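-- pv_equiv track=rewrite | github.com/asmaljcelj/statistic-models-mitochondria-golgi-aparatus | utils.py | group_curvatures_data
-- ===== SOURCE A (Python) =====
-- def group_curvatures_data(data):
--     grouped_data = {}
--     for skeleton_curvatures in data:
--         curvatures = data[skeleton_curvatures]
--         for i, curvature in enumerate(curvatures):
--             if i not in grouped_data:
--                 grouped_data[i] = []
--             grouped_data[i].append(curvature)
--     return grouped_data
-- ===== SOURCE B (Python) =====
-- def group_curvatures_data(data):
--     maxlen = max((len(v) for v in data.values()), default=0)
--     return {i: [v[i] for v in data.values() if i < len(v)]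
--             for i in range(maxlen)}
-- ===== Notes on version B (the rewrite author's own statement) =====
-- stated objective: alternative
-- what changed: B inverts the loop nesting: instead of A's skeleton-first pass that grows an index-keyed dict entry by entry, B precomputes the maximum skeleton length and builds the result index-first, one complete bucket per index via a comprehension over the skeletons.
import Mathlib
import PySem

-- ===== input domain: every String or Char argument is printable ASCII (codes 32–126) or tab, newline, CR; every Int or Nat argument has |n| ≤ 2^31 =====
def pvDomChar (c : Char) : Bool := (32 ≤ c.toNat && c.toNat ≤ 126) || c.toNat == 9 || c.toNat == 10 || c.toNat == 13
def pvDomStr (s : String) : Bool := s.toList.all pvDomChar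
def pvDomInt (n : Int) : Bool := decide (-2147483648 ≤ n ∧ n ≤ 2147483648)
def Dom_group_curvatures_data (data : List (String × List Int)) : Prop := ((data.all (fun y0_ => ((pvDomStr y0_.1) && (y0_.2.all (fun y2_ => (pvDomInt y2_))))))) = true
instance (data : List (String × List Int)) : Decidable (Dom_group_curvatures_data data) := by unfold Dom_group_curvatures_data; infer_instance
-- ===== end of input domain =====

-- B builds the grouped dict index-first (a max-length pass, then one bucket per index)
-- instead of A's skeleton-first dict accumulation; objective: alternative decomposition, same cost.

-- ===== PORT A =====
-- literal transliteration of A: iterate the dict's entries, enumerate each value list,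
-- insert [] on a missing index key, then append (the dict ports to PySem.Dict over Int keys)
def group_curvatures_data (data : List (String × List Int)) : List (Int × List Int) :=
  (data.foldl (fun grouped_data p =>
      (PySem.List.enumerate p.2 0).foldl (fun grouped_data ic =>
        let gd := if grouped_data.contains ic.1 then grouped_data
                  else grouped_data.insert ic.1 []
        gd.modify ic.1 [] (fun l => l ++ [ic.2])) grouped_data)
    PySem.Dict.empty).items

-- ===== PORT B =====
-- transliteration of Source B: maxlen = max((len(v) for v in data.values()), default=0), then
-- {i: [v[i] for v in data.values() if i < len(v)] for i in range(maxlen)}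
def group_curvatures_data_alt (data : List (String × List Int)) : List (Int × List Int) :=
  let maxlen := data.foldl (fun m p => max m p.2.length) 0
  (List.range maxlen).map (fun (i : Nat) => ((i : Int), data.filterMap (fun p => p.2[i]?)))

-- ===== PRECONDITION & SPEC =====
def Spec_group_curvatures_data (data : List (String × List Int)) (out : List (Int × List Int)) : Prop := out = group_curvatures_data_alt data
instance (data : List (String × List Int)) (out : List (Int × List Int)) : Decidable (Spec_group_curvatures_data data out) := by unfold Spec_group_curvatures_data; infer_instance

-- ===== CLAIM (what is proved, stated in full; the proofs are below) =====
def Claim_equal_group_curvatures_data : Prop := ∀ (data : List (String × List Int)), Dom_group_curvatures_data data → Spec_group_curvatures_data data (group_curvatures_data data)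

-- ===== LEMMAS AND PROOFS =====

theorem pv_step_eq_modify (d : PySem.Dict Int (List Int)) (i : Int) (c : Int) :
    (if d.contains i then d else d.insert i []).modify i [] (fun l => l ++ [c])
      = d.modify i [] (fun l => l ++ [c]) := by
  by_cases h : d.contains i
  · simp [h]
  · simp only [h, Bool.false_eq_true, if_false]
    unfold PySem.Dict.modify
    rw [PySem.Dict.getD_insert_self]
    rw [PySem.Dict.getD_of_not_contains _ _ (by simpa using h)]
    apply PySem.Dict.ext
    rw [PySem.Dict.items_insert_of_contains _ _ (by simp)]
    rw [PySem.Dict.items_insert_of_not_contains _ _ (by simpa using h)]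
    rw [PySem.Dict.items_insert_of_not_contains _ _ (by simpa using h)]
    rw [List.map_append]
    have hcong : ∀ p ∈ d.items, (if (p.1 == i) = true then (i, ([] : List Int) ++ [c]) else p) = p := by
      intro p hp
      have hk : p.1 ∈ d.keys := PySem.Dict.mem_keys_of_mem_items d hp
      have hne : ¬ (p.1 == i) = true := by
        intro he
        exact absurd ((PySem.Dict.contains_iff_mem_keys d p.1).2 hk)
          (by simpa [show p.1 = i from by simpa using he] using h)
      simp [hne]
    rw [List.map_congr_left hcong]
    simp

theorem pv_afold_eq_flat (data : List (String × List Int)) :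
    data.foldl (fun grouped_data p =>
      (PySem.List.enumerate p.2 0).foldl (fun grouped_data ic =>
        let gd := if grouped_data.contains ic.1 then grouped_data
                  else grouped_data.insert ic.1 []
        gd.modify ic.1 [] (fun l => l ++ [ic.2])) grouped_data)
      PySem.Dict.empty
    = (data.flatMap (fun p => PySem.List.enumerate p.2 0)).foldl
        (fun d ic => d.modify ic.1 [] (fun l => l ++ [ic.2])) PySem.Dict.empty := by
  rw [List.foldl_flatMap]
  apply PySem.List.foldl_congr_mem
  intro acc p _
  apply PySem.List.foldl_congr_mem
  intro acc' ic _
  exact pv_step_eq_modify acc' ic.1 ic.2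

theorem pv_items_eq_keys_map {κ ν : Type} [BEq κ] [LawfulBEq κ]
    (d : PySem.Dict κ ν) (h : d.keys.Nodup) (d0 : ν) :
    d.items = d.keys.map (fun k => (k, d.getD k d0)) := by
  simp only [PySem.Dict.keys, List.map_map]
  conv_lhs => rw [show d.items = d.items.map id from (List.map_id d.items).symm]
  apply List.map_congr_left
  intro p hp
  have := PySem.Dict.getD_of_mem_items (d := d) (k := p.1) (v := p.2) (by simpa using hp) h d0
  simp [Function.comp, this]

theorem pv_range_filter (M L : ℕ) :
    List.range M ++ (List.range L).filter (fun j => !decide (j < M)) = List.range (max M L) := by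
  by_cases h : L ≤ M
  · have : (List.range L).filter (fun j => !decide (j < M)) = [] := by
      apply List.filter_eq_nil_iff.2
      intro j hj
      simp at hj ⊢
      omega
    rw [this, List.append_nil, Nat.max_eq_left h]
  · replace h := Nat.lt_of_not_le h
    have hmax : max M L = M + (L - M) := by rw [Nat.max_eq_right (le_of_lt h)]; omega
    rw [hmax, List.range_add]
    congr 1
    have hsplit : List.range L = List.range M ++ (List.range (L - M)).map (fun x => M + x) := by
      have hL2 : M + (L - M) = L := by omega
      have h0 := @List.range_add M (L - M)
      rw [hL2] at h0
      exact h0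
    rw [hsplit, List.filter_append]
    have h1 : (List.range M).filter (fun j => !decide (j < M)) = [] := by
      apply List.filter_eq_nil_iff.2; intro j hj; simp at hj ⊢; omega
    have h2 : ((List.range (L - M)).map (fun x => M + x)).filter (fun j => !decide (j < M)) =
        (List.range (L - M)).map (fun x => M + x) := by
      apply List.filter_eq_self.2; intro j hj; simp at hj ⊢; omega
    rw [h1, h2, List.nil_append]

theorem pv_update_range (M L : ℕ) :
    PySem.Set.update ((List.range M).map (Int.ofNat)) ((List.range L).map (Int.ofNat))
      = (List.range (max M L)).map (Int.ofNat) := by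
  rw [PySem.Set.update_eq_append_filter]
  rw [PySem.Set.ofList_eq_self_of_nodup _ (by
    apply List.Nodup.map _ (List.nodup_range)
    intro a b hab; exact Int.ofNat.inj hab)]
  rw [List.filter_map]
  have hf : List.filter ((fun y => !PySem.Set.contains ((List.range M).map Int.ofNat) y) ∘ Int.ofNat) (List.range L)
      = (List.range L).filter (fun j => !decide (j < M)) := by
    apply List.filter_congr
    intro j _
    simp only [Function.comp_apply]
    congr 1
    by_cases hj : j < M
    · have hcon : PySem.Set.contains ((List.range M).map Int.ofNat) (Int.ofNat j) = true :=
        (PySem.Set.contains_iff _ _).2 (List.mem_map.2 ⟨j, List.mem_range.2 hj, rfl⟩)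
      rw [hcon, decide_eq_true hj]
    · have hcon : PySem.Set.contains ((List.range M).map Int.ofNat) (Int.ofNat j) = false := by
        rw [Bool.eq_false_iff]
        intro hc
        obtain ⟨k, hk, hke⟩ := List.mem_map.1 ((PySem.Set.contains_iff _ _).1 hc)
        have hkj : k = j := Int.ofNat.inj hke
        exact hj (hkj ▸ List.mem_range.1 hk)
      rw [hcon, decide_eq_false hj]
  rw [hf, ← List.map_append, pv_range_filter]

theorem pv_ofList_flat (data : List (String × List Int)) (M : ℕ) :
    PySem.Set.update ((List.range M).map (Int.ofNat))
        (data.flatMap (fun p => (List.range p.2.length).map (Int.ofNat)))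
      = (List.range (data.foldl (fun m p => max m p.2.length) M)).map (Int.ofNat) := by
  induction data generalizing M with
  | nil => simp [PySem.Set.update_nil]
  | cons p ds ih =>
    rw [List.flatMap_cons, PySem.Set.update_append, pv_update_range, List.foldl_cons]
    exact ih (max M p.2.length)

theorem pv_filter_enumerate (v : List Int) (s n : ℕ) :
    (PySem.List.enumerate v (s : Int)).filter (fun q => q.1 == ((n : ℕ) : Int))
      = if s ≤ n ∧ n - s < v.length then [(((n : ℕ) : Int), v[n - s]!)] else [] := by
  induction v generalizing s with
  | nil =>
    rw [PySem.List.enumerate_nil, List.filter_nil, if_neg (by simp)]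
  | cons c rest ih =>
    rw [PySem.List.enumerate_cons, List.filter_cons]
    have htail : ((s : Int) + 1) = ((s + 1 : ℕ) : Int) := by push_cast; ring
    by_cases hsn : s = n
    · subst hsn
      have hhd : (((s : ℕ) : Int) == ((s : ℕ) : Int)) = true := by simp
      rw [hhd, if_pos rfl, htail, ih (s + 1), if_neg (by omega), if_pos (by simp)]
      simp
    · have hhd : (((s : ℕ) : Int) == ((n : ℕ) : Int)) = false := by simp; omega
      rw [hhd]
      simp only [Bool.false_eq_true, if_false]
      rw [htail, ih (s + 1)]
      by_cases hc : s + 1 ≤ n ∧ n - (s + 1) < rest.length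
      · rw [if_pos hc, if_pos (by simp; omega)]
        have h1 : n - s = (n - (s + 1)) + 1 := by omega
        rw [h1]
        simp
      · rw [if_neg hc, if_neg (by simp; omega)]

theorem pv_flatMap_toList (data : List (String × List Int)) (i : ℕ) :
    data.flatMap (fun p => (p.2[i]?).toList) = data.filterMap (fun p => p.2[i]?) := by
  induction data with
  | nil => rfl
  | cons p ds ih =>
    rw [List.flatMap_cons, List.filterMap_cons]
    cases h : p.2[i]? with
    | none => simpa [h] using ih
    | some x => simpa [h] using ih

theorem pv_bucket (data : List (String × List Int)) (i : ℕ) :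
    ((data.flatMap (fun p => PySem.List.enumerate p.2 0)).filter
        (fun q => q.1 == ((i : ℕ) : Int))).map (fun x => x.2)
      = data.filterMap (fun p => p.2[i]?) := by
  rw [List.filter_flatMap, List.map_flatMap, ← pv_flatMap_toList]
  congr 1
  funext p
  rw [show (0 : Int) = ((0 : ℕ) : Int) from rfl, pv_filter_enumerate]
  by_cases h : i < p.2.length
  · have : (0 ≤ i ∧ i - 0 < p.2.length) := by omega
    simp only [this]
    have h4 : p.2[i]? = some p.2[i] := List.getElem?_eq_getElem h
    simp [h4, List.getElem!_eq_getElem?_getD]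
  · have h2 : ¬ (0 ≤ i ∧ i - 0 < p.2.length) := by omega
    have h3 : p.2[i]? = none := List.getElem?_eq_none (le_of_not_gt h)
    rw [if_neg h2, h3]
    rfl

theorem pv_main (data : List (String × List Int)) :
    group_curvatures_data data = group_curvatures_data_alt data := by
  unfold group_curvatures_data group_curvatures_data_alt
  rw [pv_afold_eq_flat]
  set L := data.flatMap (fun p => PySem.List.enumerate p.2 0) with hL
  set d := L.foldl (fun d ic => d.modify ic.1 [] (fun l => l ++ [ic.2])) PySem.Dict.empty with hd
  have hkeys : d.keys = (List.range (data.foldl (fun m p => max m p.2.length) 0)).map Int.ofNat := by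
    rw [hd, PySem.Dict.keys_foldl_modify_key L (fun ic => ic.1) [] (fun _ ic => (fun l => l ++ [ic.2]))]
    rw [PySem.Dict.keys_empty, PySem.Set.update_nil_left]
    have hmap : L.map (fun ic => ic.1) = data.flatMap (fun p => (List.range p.2.length).map Int.ofNat) := by
      rw [hL, List.map_flatMap]
      congr 1; funext p
      rw [PySem.List.map_fst_enumerate]
      simp only [zero_add]
      rw [show ((p.2.length : ℕ) : Int) = ((p.2.length : ℕ) : Int) from rfl, PySem.List.pyRange_zero_natCast]
      rfl
    rw [hmap, ← PySem.Set.update_nil_left]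
    have := pv_ofList_flat data 0
    simpa using this
  have hnodup : d.keys.Nodup := by
    rw [hd]
    exact PySem.Dict.nodup_keys_foldl_modify_key L (fun ic => ic.1) [] (fun _ ic => (fun l => l ++ [ic.2])) _ (by simp [PySem.Dict.keys_empty])
  rw [pv_items_eq_keys_map d hnodup [], hkeys, List.map_map]
  apply List.map_congr_left
  intro i _
  have hgd : d.getD (Int.ofNat i) [] = data.filterMap (fun p => p.2[i]?) := by
    rw [hd, PySem.Dict.getD_foldl_modify_append, PySem.Dict.getD_empty]
    rw [List.nil_append]
    exact pv_bucket data i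
  simp only [Function.comp_apply]
  rw [hgd]
  rfl

-- ===== VERDICT (by name: the statement is the Claim_ definition above) =====
theorem group_curvatures_data_spec : Claim_equal_group_curvatures_data := by
  intro data _
  unfold Spec_group_curvatures_data
  exact pv_main data
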